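-- pv_equiv track=rewrite | github.com/AlejandroZBarajas/algoritmo-genetico | cruza.py | cruzar_padres
-- ===== SOURCE A (Python) =====
-- def cruzar_padres(padre1, padre2):
--     """
--     Cruza dos padres para generar dos hijos.
--     Alterna genes entre padres (p1, p2, p1, p2) y corrige duplicados.
--
--     Parámetros:
--     - padre1: Lista de 4 índices
--     - padre2: Lista de 4 índices
--
--     Retorna:
--     - hijo1, hijo2: Tupla con los dos hijos generados
--     """
--     # Crear hijos alternando genes
--     hijo1 = [padre1[0], padre2[1], padre1[2], padre2[3]]
--     hijo2 = [padre2[0], padre1[1], padre2[2], padre1[3]]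
--
--     # Función auxiliar para corregir duplicados
--     def corregir_duplicados(hijo):
--         usado = set()
--         for i in range(len(hijo)):
--             if hijo[i] in usado:
--                 # Buscar un valor no usado (de 0 a 10)
--                 for nuevo_valor in range(11):
--                     if nuevo_valor not in usado:
--                         hijo[i] = nuevo_valor
--                         break
--             usado.add(hijo[i])
--         return hijo
--
--     hijo1 = corregir_duplicados(hijo1)
--     hijo2 = corregir_duplicados(hijo2)
--
--     return hijo1, hijo2
-- ===== SOURCE B (Python) =====
-- def cruzar_padres(padre1, padre2):
--     hijo1 = [padre1[0], padre2[1], padre1[2], padre2[3]]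
--     hijo2 = [padre2[0], padre1[1], padre2[2], padre1[3]]
--
--     def corregir(hijo):
--         out = []
--         pool = list(range(11))  # smallest-first pool of still-available values
--         for v in hijo:
--             if v in out:
--                 if pool:
--                     out.append(pool.pop(0))
--                 else:
--                     out.append(v)
--             else:
--                 out.append(v)
--                 if v in pool:
--                     pool.remove(v)
--         return out
--
--     return corregir(hijo1), corregir(hijo2)
-- ===== Notes on version B (the rewrite author's own statement) =====
-- stated objective: alternative
-- what changed: Duplicate correction keeps an ordered pool of still-available values 0..10 and pops its head for a duplicate, building a fresh output list, instead of mutating in place with a 'usado' set and rescanning range(11) for each duplicate.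
import Mathlib
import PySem

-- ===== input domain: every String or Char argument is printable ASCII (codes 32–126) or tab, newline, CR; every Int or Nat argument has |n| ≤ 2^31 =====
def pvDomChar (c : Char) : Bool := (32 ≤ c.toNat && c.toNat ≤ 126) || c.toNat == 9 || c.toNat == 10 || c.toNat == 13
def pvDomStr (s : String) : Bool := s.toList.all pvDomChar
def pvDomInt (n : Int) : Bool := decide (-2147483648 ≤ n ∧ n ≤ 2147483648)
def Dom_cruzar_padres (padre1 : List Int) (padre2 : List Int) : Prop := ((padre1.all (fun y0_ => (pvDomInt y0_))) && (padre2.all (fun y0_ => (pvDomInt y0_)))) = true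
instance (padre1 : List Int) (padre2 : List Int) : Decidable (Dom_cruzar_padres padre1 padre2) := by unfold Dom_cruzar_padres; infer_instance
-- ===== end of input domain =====

-- B replaces A's per-duplicate rescan of range(11) against a 'usado' set by an ordered pool of
-- still-available values whose head is popped for each duplicate (objective: alternative).

-- ===== PORT A =====
-- inner 'for nuevo_valor in range(11): if nuevo_valor not in usado: …; break'
def findNuevo (usado : PySem.Set Int) : List Int → Option Int
  | [] => none
  | k :: rest => if usado.contains k then findNuevo usado rest else some k

-- one iteration of A's 'for i in range(len(hijo))' loop, state = (hijo, usado)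
def corregirStep (st : List Int × PySem.Set Int) (i : Nat) : List Int × PySem.Set Int :=
  let v := st.1.getD i 0
  if st.2.contains v then
    match findNuevo st.2 (PySem.List.pyRange 0 11 1) with
    | some k => (st.1.set i k, st.2.add k)
    | none => (st.1, st.2.add v)
  else (st.1, st.2.add v)

def corregir_duplicados (hijo : List Int) : List Int :=
  ((List.range hijo.length).foldl corregirStep (hijo, PySem.Set.empty)).1

def cruzar_padres (padre1 : List Int) (padre2 : List Int) : List Int × List Int :=
  let hijo1 := [PySem.List.pyGetD padre1 0 0, PySem.List.pyGetD padre2 1 0,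
                PySem.List.pyGetD padre1 2 0, PySem.List.pyGetD padre2 3 0]
  let hijo2 := [PySem.List.pyGetD padre2 0 0, PySem.List.pyGetD padre1 1 0,
                PySem.List.pyGetD padre2 2 0, PySem.List.pyGetD padre1 3 0]
  (corregir_duplicados hijo1, corregir_duplicados hijo2)

-- ===== PORT B =====
-- one iteration of B's 'for v in hijo' loop, state = (out, pool)
def corregirAltStep (st : List Int × List Int) (v : Int) : List Int × List Int :=
  if v ∈ st.1 then
    match st.2 with
    | w :: rest => (st.1 ++ [w], rest)
    | [] => (st.1 ++ [v], [])
  else (st.1 ++ [v], if v ∈ st.2 then st.2.erase v else st.2)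

def corregirAlt (hijo : List Int) : List Int :=
  (hijo.foldl corregirAltStep ([], PySem.List.pyRange 0 11 1)).1

def cruzar_padres_alt (padre1 : List Int) (padre2 : List Int) : List Int × List Int :=
  let hijo1 := [PySem.List.pyGetD padre1 0 0, PySem.List.pyGetD padre2 1 0,
                PySem.List.pyGetD padre1 2 0, PySem.List.pyGetD padre2 3 0]
  let hijo2 := [PySem.List.pyGetD padre2 0 0, PySem.List.pyGetD padre1 1 0,
                PySem.List.pyGetD padre2 2 0, PySem.List.pyGetD padre1 3 0]
  (corregirAlt hijo1, corregirAlt hijo2)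

-- ===== PRECONDITION & SPEC =====
-- Pre_ excludes exactly the inputs where A raises IndexError: a parent shorter than 4 genes.
def Pre_cruzar_padres (padre1 : List Int) (padre2 : List Int) : Prop :=
  4 ≤ padre1.length ∧ 4 ≤ padre2.length
instance (padre1 : List Int) (padre2 : List Int) : Decidable (Pre_cruzar_padres padre1 padre2) := by
  unfold Pre_cruzar_padres; infer_instance

def pvWitness_cruzar_padres : List Int × List Int := ([1, 2, 3, 4], [4, 3, 2, 1])

def Spec_cruzar_padres (padre1 : List Int) (padre2 : List Int) (out : List Int × List Int) : Prop := out = cruzar_padres_alt padre1 padre2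
instance (padre1 : List Int) (padre2 : List Int) (out : List Int × List Int) : Decidable (Spec_cruzar_padres padre1 padre2 out) := by unfold Spec_cruzar_padres; infer_instance

-- ===== CLAIM (what is proved, stated in full; the proofs are below) =====
def Claim_equal_cruzar_padres : Prop := ∀ (padre1 : List Int) (padre2 : List Int), Dom_cruzar_padres padre1 padre2 → Pre_cruzar_padres padre1 padre2 → Spec_cruzar_padres padre1 padre2 (cruzar_padres padre1 padre2)

-- ===== LEMMAS AND PROOFS =====

-- the ordered pool of still-available values, as a function of the produced prefix
def poolOf (done : List Int) : List Int :=
  (PySem.List.pyRange 0 11 1).filter (fun k => !decide (k ∈ done))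

theorem nodup_poolOf (done : List Int) : (poolOf done).Nodup :=
  List.Nodup.filter _ (by decide : (PySem.List.pyRange 0 11 1).Nodup)

theorem poolOf_nil : poolOf [] = PySem.List.pyRange 0 11 1 := by
  simp [poolOf]

theorem poolOf_append (done : List Int) (k : Int) :
    poolOf (done ++ [k]) = (poolOf done).filter (fun x => x != k) := by
  simp only [poolOf, List.filter_filter]
  apply List.filter_congr
  intro x _
  by_cases h1 : x ∈ done <;> by_cases h2 : x = k <;> simp [h1, h2]

theorem getD_append_len (l r : List Int) (x : Int) :
    (l ++ x :: r).getD l.length 0 = x := by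
  simp [List.getD]

theorem contains_eq_mem (usado : PySem.Set Int) (x : Int) :
    usado.contains x = decide (x ∈ usado) := by
  simp [PySem.Set.contains]

theorem findNuevo_eq (usado : PySem.Set Int) (l : List Int) :
    findNuevo usado l = (l.filter (fun k => !usado.contains k)).head? := by
  induction l with
  | nil => simp [findNuevo]
  | cons k rest ih =>
    by_cases h : k ∈ usado
    · simp [findNuevo, h, ih]
    · simp [findNuevo, h]

theorem contains_add_eq (usado : PySem.Set Int) (done : List Int) (y x : Int)
    (hu : ∀ z : Int, usado.contains z = decide (z ∈ done)) :
    (usado.add y).contains x = decide (x ∈ done ++ [y]) := by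
  have h1 : (x ∈ usado) ↔ (x ∈ done) :=
    decide_eq_decide.mp ((contains_eq_mem usado x).symm.trans (hu x))
  rw [contains_eq_mem, decide_eq_decide, PySem.Set.mem_add, List.mem_append,
    List.mem_singleton, h1]

-- main invariant: A's index loop over the suffix equals B's element loop,
-- given usado ≡ membership in the produced prefix and pool = poolOf prefix
theorem foldAB (rest : List Int) : ∀ (done : List Int) (usado : PySem.Set Int),
    (∀ x : Int, usado.contains x = decide (x ∈ done)) →
    ((List.range' done.length rest.length).foldl corregirStep (done ++ rest, usado)).1
      = (rest.foldl corregirAltStep (done, poolOf done)).1 := by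
  induction rest with
  | nil => intro done usado hu; simp
  | cons v rest0 ih =>
    intro done usado hu
    rw [List.length_cons, List.range'_succ, List.foldl_cons, List.foldl_cons]
    have hstep : corregirStep (done ++ v :: rest0, usado) done.length =
        if v ∈ done then
          match findNuevo usado (PySem.List.pyRange 0 11 1) with
          | some k => (done ++ k :: rest0, usado.add k)
          | none => (done ++ v :: rest0, usado.add v)
        else (done ++ v :: rest0, usado.add v) := by
      simp only [corregirStep, getD_append_len, hu v]
      by_cases hv : v ∈ done
      · simp only [hv, decide_true, if_true]
        cases hfn : findNuevo usado (PySem.List.pyRange 0 11 1) with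
        | none => simp
        | some k => simp  -- hijo[i] = nuevo_valor
      · simp [hv]
    have hfind : findNuevo usado (PySem.List.pyRange 0 11 1) = (poolOf done).head? := by
      rw [findNuevo_eq, poolOf]
      congr 1
      apply List.filter_congr
      intro x _
      rw [hu x]
    by_cases hv : v ∈ done
    · -- duplicate: A takes the first unused value of 0..10, B pops the pool head
      rw [hstep, if_pos hv]
      cases hpool : poolOf done with
      | nil =>
        rw [hfind, hpool]
        simp only [List.head?_nil]
        have hB : corregirAltStep (done, []) v = (done ++ [v], []) := by
          simp [corregirAltStep, hv]
        rw [hB]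
        have heq : done ++ v :: rest0 = (done ++ [v]) ++ rest0 := by simp
        have hlen : done.length + 1 = (done ++ [v]).length := by simp
        rw [heq, hlen]
        have hpool' : poolOf (done ++ [v]) = [] := by
          rw [poolOf_append, hpool]; rfl
        have hIH := ih (done ++ [v]) (usado.add v) (fun x => contains_add_eq usado done v x hu)
        rw [hpool'] at hIH
        exact hIH
      | cons k ps =>
        rw [hfind, hpool]
        simp only [List.head?_cons]
        have hB : corregirAltStep (done, k :: ps) v = (done ++ [k], ps) := by
          simp [corregirAltStep, hv]
        rw [hB]
        have heq : done ++ k :: rest0 = (done ++ [k]) ++ rest0 := by simp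
        have hlen : done.length + 1 = (done ++ [k]).length := by simp
        rw [heq, hlen]
        have hkps : k ∉ ps := by
          have := nodup_poolOf done
          rw [hpool] at this
          exact (List.nodup_cons.mp this).1
        have hpool' : poolOf (done ++ [k]) = ps := by
          rw [poolOf_append, hpool]
          simp only [List.filter_cons]
          simp only [bne_self_eq_false, Bool.false_eq_true, if_false]
          exact List.filter_eq_self.mpr (fun x hx => by
            simp only [bne_iff_ne, ne_eq]
            intro hxk; exact hkps (hxk ▸ hx))
        rw [← hpool']
        exact ih (done ++ [k]) (usado.add k) (fun x => contains_add_eq usado done k x hu)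
    · -- fresh value: both append v; B discards v from the pool if present
      rw [hstep, if_neg hv]
      have hB : corregirAltStep (done, poolOf done) v =
          (done ++ [v], if v ∈ poolOf done then (poolOf done).erase v else poolOf done) := by
        simp [corregirAltStep, hv]
      rw [hB]
      have hpool' : poolOf (done ++ [v]) =
          (if v ∈ poolOf done then (poolOf done).erase v else poolOf done) := by
        rw [poolOf_append]
        by_cases hvp : v ∈ poolOf done
        · rw [if_pos hvp, (nodup_poolOf done).erase_eq_filter v]
        · rw [if_neg hvp]
          exact List.filter_eq_self.mpr (fun x hx => by
            simp only [bne_iff_ne, ne_eq]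
            intro hxv; exact hvp (hxv ▸ hx))
      have heq : done ++ v :: rest0 = (done ++ [v]) ++ rest0 := by simp
      have hlen : done.length + 1 = (done ++ [v]).length := by simp
      rw [heq, hlen, ← hpool']
      exact ih (done ++ [v]) (usado.add v) (fun x => contains_add_eq usado done v x hu)

theorem corregir_eq (hijo : List Int) : corregir_duplicados hijo = corregirAlt hijo := by
  have h := foldAB hijo [] PySem.Set.empty (by
    intro x; simp [PySem.Set.empty, PySem.Set.contains])
  simpa [corregir_duplicados, corregirAlt, List.range_eq_range', poolOf_nil] using h

-- ===== VERDICT (by name: the statement is the Claim_ definition above) =====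
theorem cruzar_padres_spec : Claim_equal_cruzar_padres := by
  intro p1 p2 _ _
  unfold Spec_cruzar_padres cruzar_padres cruzar_padres_alt
  simp only [corregir_eq]
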